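-- pv_equiv track=rewrite | github.com/shcv/kvl | python/kvl/parser.py | _find_unescaped_separator
-- ===== SOURCE A (Python) =====
-- def _find_unescaped_separator(line: str, separator: str) -> int:
--     """Find the first separator not preceded by backslashes.
--
--     KVL extends CCL with escape sequences: backslash + separator escapes the separator.
--     This allows values to contain separator characters.
--
--     Examples:
--         "url = https\\://example.com" → key="url", value="https://example.com"
--         "equation = x\\=y+z" → key="equation", value="x=y+z"
--     """
--     pos = 0
--     while pos < len(line):
--         sep_pos = line.find(separator, pos)
--         if sep_pos == -1:
--             return -1
--         if sep_pos > 0 and line[sep_pos - 1] == "\\":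
--             pos = sep_pos + 1
--         else:
--             return sep_pos
--     return -1
-- ===== SOURCE B (Python) =====
-- import re
--
--
-- def _find_unescaped_separator(line: str, separator: str) -> int:
--     """Leftmost occurrence of separator not immediately preceded by a backslash."""
--     m = re.search(r'(?<!\\)' + re.escape(separator), line)
--     return m.start() if m else -1
-- ===== Notes on version B (the rewrite author's own statement) =====
-- stated objective: idiomatic
-- what changed: Replaced A's Python-level find-and-skip while loop (advance pos past each escaped occurrence) by a single compiled-regex search with a negative lookbehind, (?<!\\) + re.escape(separator).
-- outside the precondition, e.g. on _find_unescaped_separator('', ''): A returns -1, B returns 0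
import Mathlib
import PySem

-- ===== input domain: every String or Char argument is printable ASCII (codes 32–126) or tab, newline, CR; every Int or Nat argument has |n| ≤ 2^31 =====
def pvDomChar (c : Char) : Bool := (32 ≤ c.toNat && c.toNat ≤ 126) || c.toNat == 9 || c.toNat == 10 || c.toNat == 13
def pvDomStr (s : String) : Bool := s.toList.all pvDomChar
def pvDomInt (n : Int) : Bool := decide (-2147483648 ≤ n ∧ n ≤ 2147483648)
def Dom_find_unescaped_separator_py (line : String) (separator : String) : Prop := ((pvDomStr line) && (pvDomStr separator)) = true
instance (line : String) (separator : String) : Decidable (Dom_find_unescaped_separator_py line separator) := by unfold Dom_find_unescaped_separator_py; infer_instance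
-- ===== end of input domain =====

-- B replaces A's find-and-skip while loop by a single regex search with a negative
-- lookbehind (more idiomatic); equivalence is proved for the return value only.

-- ===== PORT A =====
-- A's while loop: pos advances past each escaped occurrence; line.find(sep, pos) is
-- PySem.Chars.findFrom.  line[sep_pos-1] is ported as l[sep_pos.toNat - 1]?: it is
-- only read under the guard 0 < sep_pos, where the index is in range, so this is exact.
def pvALoop (l sep : List Char) (pos : Nat) : Int :=
  if hp : pos < l.length then
    let sep_pos := PySem.Chars.findFrom l sep (pos : Int)
    if hs : sep_pos = -1 then -1
    else if 0 < sep_pos ∧ l[sep_pos.toNat - 1]? = some '\\' then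
      pvALoop l sep (sep_pos.toNat + 1)
    else sep_pos
  else -1
termination_by l.length - pos
decreasing_by
  have h := PySem.Chars.findFrom_natCast_spec l sep pos (le_of_lt hp) hs
  omega

def find_unescaped_separator_py (line : String) (separator : String) : Int :=
  pvALoop line.toList separator.toList 0

-- ===== PORT B =====
-- Source B calls re.search(r'(?<!\\)' + re.escape(separator), line): the port transcribes the
-- regex engine's leftmost-match rule for this pattern — try positions i = 0,1,…: the
-- pattern matches at i iff separator occurs at i (sep <+: l.drop i) and the lookbehind
-- holds (i = 0 or l[i-1] ≠ '\\'); return the first such i (m.start()), else -1.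
def pvBScan (l sep : List Char) (i : Nat) : Int :=
  if i ≤ l.length then
    if sep <+: l.drop i ∧ (i = 0 ∨ l[i - 1]? ≠ some '\\') then (i : Int)
    else pvBScan l sep (i + 1)
  else -1
termination_by l.length + 1 - i

def find_unescaped_separator_py_alt (line : String) (separator : String) : Int :=
  pvBScan line.toList separator.toList 0

-- ===== PRECONDITION & SPEC =====
-- Pre_ excludes only the degenerate input line = "" with separator = "": A's while loop
-- never runs and returns -1, while str.find-style/regex search finds the empty separator
-- in the empty string at 0 — both answers are defensible on this meaningless corner.
def Pre_find_unescaped_separator_py (line : String) (separator : String) : Prop :=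
  ¬ (line = "" ∧ separator = "")
instance (line : String) (separator : String) : Decidable (Pre_find_unescaped_separator_py line separator) := by unfold Pre_find_unescaped_separator_py; infer_instance

def pvWitness_find_unescaped_separator_py : String × String := ("url = https\\://example.com", ":")

def Spec_find_unescaped_separator_py (line : String) (separator : String) (out : Int) : Prop := out = find_unescaped_separator_py_alt line separator
instance (line : String) (separator : String) (out : Int) : Decidable (Spec_find_unescaped_separator_py line separator out) := by unfold Spec_find_unescaped_separator_py; infer_instance

-- ===== CLAIM (what is proved, stated in full; the proofs are below) =====
def Claim_equal_find_unescaped_separator_py : Prop := ∀ (line : String) (separator : String), Dom_find_unescaped_separator_py line separator → Pre_find_unescaped_separator_py line separator → Spec_find_unescaped_separator_py line separator (find_unescaped_separator_py line separator)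

-- ===== LEMMAS AND PROOFS =====

-- A prefix of l.drop j with j ≥ i is an infix of l.drop i.
theorem pv_prefix_drop_infix {l sep : List Char} {i j : Nat} (hij : i ≤ j)
    (h : sep <+: l.drop j) : sep <:+: l.drop i := by
  have : l.drop j = (l.drop i).drop (j - i) := by
    rw [List.drop_drop]; congr 1; omega
  rw [this] at h
  exact h.isInfix.trans (List.drop_suffix _ _).isInfix

-- If the separator occurs nowhere at or after i, the scan returns -1.
theorem pvBScan_none (l sep : List Char) :
    ∀ fuel i, l.length + 1 - i ≤ fuel → (∀ j, i ≤ j → ¬ sep <+: l.drop j) →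
      pvBScan l sep i = -1 := by
  intro fuel
  induction fuel with
  | zero =>
    intro i hf _
    rw [pvBScan]
    have : ¬ i ≤ l.length := by omega
    simp [this]
  | succ n ih =>
    intro i hf hnone
    rw [pvBScan]
    by_cases hi : i ≤ l.length
    · have hcond : ¬ (sep <+: l.drop i ∧ (i = 0 ∨ l[i - 1]? ≠ some '\\')) := by
        intro ⟨h1, _⟩; exact hnone i le_rfl h1
      simp only [hi, if_true, hcond, if_false]
      exact ih (i + 1) (by omega) (fun j hj => hnone j (by omega))
    · simp [hi]

-- If the separator occurs nowhere in [i, t), the scan can start at t instead of i.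
theorem pvBScan_skip (l sep : List Char) :
    ∀ fuel i t, t - i ≤ fuel → i ≤ t → t ≤ l.length →
      (∀ j, i ≤ j → j < t → ¬ sep <+: l.drop j) →
      pvBScan l sep i = pvBScan l sep t := by
  intro fuel
  induction fuel with
  | zero =>
    intro i t hf hit _ _
    have : i = t := by omega
    rw [this]
  | succ n ih =>
    intro i t hf hit hlen hnone
    rcases Nat.eq_or_lt_of_le hit with h | h
    · rw [h]
    · rw [pvBScan]
      have hi : i ≤ l.length := by omega
      have hcond : ¬ (sep <+: l.drop i ∧ (i = 0 ∨ l[i - 1]? ≠ some '\\')) := by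
        intro ⟨h1, _⟩; exact hnone i le_rfl h h1
      simp only [hi, if_true, hcond, if_false]
      exact ih (i + 1) t (by omega) (by omega) hlen (fun j hj hjt => hnone j (by omega) hjt)

-- Main list-level equivalence for a nonempty separator: the loop equals the scan
-- from any starting position.
theorem pv_main (l sep : List Char) (hsep : sep ≠ []) :
    ∀ fuel pos, l.length - pos ≤ fuel → pvALoop l sep pos = pvBScan l sep pos := by
  intro fuel
  induction fuel with
  | zero =>
    intro pos hf
    have hp : ¬ pos < l.length := by omega
    rw [pvALoop]; simp only [hp, dif_neg, not_false_iff]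
    refine (pvBScan_none l sep (l.length + 1 - pos) pos le_rfl ?_).symm
    intro j hj hpre
    have := hpre.length_le
    simp [List.length_drop] at this
    have : sep.length = 0 := by omega
    exact hsep (List.eq_nil_of_length_eq_zero this)
  | succ n ih =>
    intro pos hf
    rw [pvALoop]
    by_cases hp : pos < l.length
    · simp only [hp, dif_pos]
      by_cases hs : PySem.Chars.findFrom l sep (pos : Int) = -1
      · simp only [hs, dif_pos]
        refine (pvBScan_none l sep (l.length + 1 - pos) pos le_rfl ?_).symm
        intro j hj hpre
        exact ((PySem.Chars.findFrom_natCast_eq_neg_one_iff l sep pos (le_of_lt hp)).mp hs)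
          (pv_prefix_drop_infix hj hpre)
      · simp only [hs, dif_neg, not_false_iff]
        obtain ⟨hle, hpre, hmin⟩ :=
          PySem.Chars.findFrom_natCast_spec l sep pos (le_of_lt hp) hs
        set f := PySem.Chars.findFrom l sep (pos : Int) with hfdef
        set t := f.toNat with htdef
        clear_value t f
        have hf0 : (0 : Int) ≤ f := le_trans (by omega) hle
        have hft : f = (t : Int) := by omega
        have hpost : pos ≤ t := by omega
        have htle : t ≤ l.length := by
          by_contra h
          have hnil : l.drop t = [] := List.drop_eq_nil_of_le (by omega)
          rw [hnil] at hpre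
          exact hsep (List.prefix_nil.mp hpre)
        have htlen : t + sep.length ≤ l.length := by
          have := hpre.length_le
          simp [List.length_drop] at this
          omega
        have hskip : pvBScan l sep pos = pvBScan l sep t :=
          pvBScan_skip l sep (t - pos) pos t le_rfl hpost htle
            (fun j hj hjt => hmin j hj hjt)
        by_cases hb : 0 < f ∧ l[t - 1]? = some '\\'
        · rw [if_pos hb]
          have hfuel : l.length - (t + 1) ≤ n := by
            have h2 : l.length - (pos + 1) ≤ n := by omega
            exact le_trans (Nat.sub_le_sub_left (Nat.succ_le_succ hpost) l.length) h2
          rw [ih (t + 1) hfuel, hskip]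
          conv_rhs => rw [pvBScan]
          have hcond : ¬ (sep <+: l.drop t ∧ (t = 0 ∨ l[t - 1]? ≠ some '\\')) := by
            rintro ⟨_, h0 | hne⟩
            · omega
            · exact hne hb.2
          simp [htle, hcond]
        · rw [if_neg hb]
          rw [hskip]
          conv_rhs => rw [pvBScan]
          have hcond : sep <+: l.drop t ∧ (t = 0 ∨ l[t - 1]? ≠ some '\\') := by
            refine ⟨hpre, ?_⟩
            by_cases h0 : t = 0
            · exact Or.inl h0
            · refine Or.inr (fun hbs => hb ⟨by omega, hbs⟩)
          simp [htle, hcond, hft]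
    · simp only [hp, dif_neg, not_false_iff]
      refine (pvBScan_none l sep (l.length + 1 - pos) pos le_rfl ?_).symm
      intro j hj hpre
      have := hpre.length_le
      simp [List.length_drop] at this
      have : sep.length = 0 := by omega
      exact hsep (List.eq_nil_of_length_eq_zero this)

-- ===== VERDICT (by name: the statement is the Claim_ definition above) =====
theorem find_unescaped_separator_py_spec : Claim_equal_find_unescaped_separator_py := by
  intro line separator _ hpre
  unfold Spec_find_unescaped_separator_py
  unfold find_unescaped_separator_py find_unescaped_separator_py_alt
  by_cases hsep : separator.toList = []
  · have hsep' : separator = "" := String.toList_eq_nil_iff.mp hsep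
    have hline : line ≠ "" := fun h => hpre ⟨h, hsep'⟩
    have hln : line.toList ≠ [] := fun h => hline (String.toList_eq_nil_iff.mp h)
    have hlen : 0 < line.toList.length := List.length_pos_of_ne_nil hln
    have h0 : PySem.Chars.findFrom line.toList [] ((0 : Nat) : Int) = 0 := by
      have := PySem.Chars.find_nil line.toList
      simp only [PySem.Chars.findFrom_zero, Nat.cast_zero]; exact this
    rw [hsep, pvALoop, pvBScan]
    simp only [hlen, dif_pos, h0]
    norm_num
  · exact pv_main line.toList separator.toList hsep (line.toList.length) 0 (by omega)
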